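-- pv_equiv track=rewrite | github.com/jmanchuck/bigtwo-rl | bigtwo_rl/training/rewards/move_quality_reward.py | _count_combination_potential
-- ===== SOURCE A (Python) =====
-- from typing import List, Dict, Optional, Tuple, Any
--
-- def _count_combination_potential(hand: List[int]) -> int:
--     """Count potential future combinations in a hand."""
--     if not hand:
--         return 0
--
--     # Count by ranks for pairs/trips
--     rank_counts = {}
--     for card in hand:
--         rank = card // 4  # Get rank (0-12)
--         rank_counts[rank] = rank_counts.get(rank, 0) + 1
--
--     potential = 0
--
--     # Count pair/trip potential
--     for count in rank_counts.values():
--         if count >= 2: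
--             potential += 1  # Can make pair
--         if count >= 3:
--             potential += 1  # Can make trip
--         if count >= 4:
--             potential += 2  # Four of a kind is very valuable
--
--     # Count straight potential (simplified)
--     unique_ranks = sorted(rank_counts.keys())
--     consecutive_count = 1
--     for i in range(1, len(unique_ranks)):
--         if unique_ranks[i] == unique_ranks[i-1] + 1:
--             consecutive_count += 1
--             if consecutive_count >= 5:
--                 potential += 2  # Potential straight
--         else:
--             consecutive_count = 1
--
--     return potential
-- ===== SOURCE B (Python) =====
-- def _count_combination_potential(hand):
--     """Count potential future combinations in a hand."""
--     rank_counts = {}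
--     for card in hand:
--         r = card // 4
--         rank_counts[r] = rank_counts.get(r, 0) + 1
--     potential = sum((c >= 2) + (c >= 3) + 2 * (c >= 4) for c in rank_counts.values())
--     present = set(rank_counts)
--     potential += 2 * sum(1 for r in present if {r - 1, r - 2, r - 3, r - 4} <= present)
--     return potential
-- ===== Notes on version B (the rewrite author's own statement) =====
-- stated objective: alternative
-- what changed: B drops A's sort-the-distinct-ranks-and-scan-consecutive-runs straight detection entirely: it counts straight potential sortlessly via set-membership windows (a rank contributes +2 iff its four predecessor ranks are present in the rank set), and scores pair/trip/quad potential with a sum comprehension over the counter's values instead of an if-chain accumulator loop.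
import Mathlib
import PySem

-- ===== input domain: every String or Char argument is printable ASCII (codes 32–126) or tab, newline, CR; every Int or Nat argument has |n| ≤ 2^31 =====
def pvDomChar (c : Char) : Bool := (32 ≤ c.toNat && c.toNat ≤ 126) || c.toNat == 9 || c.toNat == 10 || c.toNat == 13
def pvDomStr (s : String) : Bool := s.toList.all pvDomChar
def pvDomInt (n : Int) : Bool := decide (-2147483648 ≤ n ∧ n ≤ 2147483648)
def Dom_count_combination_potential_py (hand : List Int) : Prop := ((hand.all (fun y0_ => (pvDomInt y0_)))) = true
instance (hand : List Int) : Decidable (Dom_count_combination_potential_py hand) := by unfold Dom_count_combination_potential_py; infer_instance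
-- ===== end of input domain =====

-- B detects straight potential without sorting — a rank scores +2 iff its four predecessor
-- ranks are all in the rank set — and scores pair/trip/quad counts by a sum comprehension;
-- objective: alternative (no sort, no run-scan state).

-- ===== PORT A =====
def count_combination_potential_py (hand : List Int) : Int :=
  if hand = [] then 0
  else
    let rank_counts : PySem.Dict Int Int :=
      hand.foldl (fun d card =>
        let rank := PySem.Int.floordiv card 4
        d.insert rank (d.getD rank 0 + 1)) PySem.Dict.empty
    let potential : Int := 0
    let potential := rank_counts.values.foldl (fun potential count =>
      let potential := if count ≥ 2 then potential + 1 else potential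
      let potential := if count ≥ 3 then potential + 1 else potential
      if count ≥ 4 then potential + 2 else potential) potential
    let unique_ranks := PySem.List.sorted rank_counts.keys (fun x => x) false
    -- index loop for i in range(1, len(unique_ranks)); every index is in range, so pyGetD is exact here
    let st := (PySem.List.pyRange 1 (unique_ranks.length : Int) 1).foldl
      (fun (st : Int × Int) i =>
        if PySem.List.pyGetD unique_ranks i 0 = PySem.List.pyGetD unique_ranks (i - 1) 0 + 1 then
          let consecutive_count := st.2 + 1
          let potential := if consecutive_count ≥ 5 then st.1 + 2 else st.1
          (potential, consecutive_count)
        else (st.1, 1))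
      (potential, 1)
    st.1

-- ===== PORT B =====
def count_combination_potential_py_alt (hand : List Int) : Int :=
  let rank_counts : PySem.Dict Int Int :=
    hand.foldl (fun d card =>
      let r := PySem.Int.floordiv card 4
      d.insert r (d.getD r 0 + 1)) PySem.Dict.empty
  let potential : Int := (rank_counts.values.map (fun c =>
    (if c ≥ 2 then (1:Int) else 0) + (if c ≥ 3 then 1 else 0) + 2 * (if c ≥ 4 then 1 else 0))).sum
  let present : PySem.Set Int := PySem.Set.ofList rank_counts.keys
  potential + 2 * (present.map (fun r =>
    if r - 1 ∈ present ∧ r - 2 ∈ present ∧ r - 3 ∈ present ∧ r - 4 ∈ present then (1:Int) else 0)).sum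

-- ===== PRECONDITION & SPEC =====
def Spec_count_combination_potential_py (hand : List Int) (out : Int) : Prop := out = count_combination_potential_py_alt hand
instance (hand : List Int) (out : Int) : Decidable (Spec_count_combination_potential_py hand out) := by unfold Spec_count_combination_potential_py; infer_instance

-- ===== CLAIM (what is proved, stated in full; the proofs are below) =====
def Claim_equal_count_combination_potential_py : Prop := ∀ (hand : List Int), Dom_count_combination_potential_py hand → Spec_count_combination_potential_py hand (count_combination_potential_py hand)

-- ===== LEMMAS AND PROOFS =====

/-- Score one rank's multiplicity (pair/trip/quad bonus). -/
def pvScore (c : Int) : Int := (if c ≥ 2 then 1 else 0) + (if c ≥ 3 then 1 else 0) + (if c ≥ 4 then 2 else 0)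

/-- Straight-run bonus collected while scanning `rest` after previous rank `p` with run length `cc`. -/
def pvStraight (p cc : Int) : List Int → Int
  | [] => 0
  | r :: rest =>
    if r = p + 1 then (if cc + 1 ≥ 5 then 2 else 0) + pvStraight r (cc + 1) rest
    else pvStraight r 1 rest

lemma pvA_pair_fold (vals : List Int) (p : Int) :
    vals.foldl (fun potential count =>
      let potential := if count ≥ 2 then potential + 1 else potential
      let potential := if count ≥ 3 then potential + 1 else potential
      if count ≥ 4 then potential + 2 else potential) p
    = p + (vals.map pvScore).sum := by
  induction vals generalizing p with
  | nil => simp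
  | cons c vals ih =>
    simp only [List.foldl_cons, List.map_cons, List.sum_cons]
    rw [ih]
    simp only [pvScore]
    split_ifs <;> ring1

/-- The Nat-indexed adjacent-pair fold over a list equals the structural straight scan. -/
lemma pvA_straight_nat (t : List Int) (h p cc : Int) :
    ((List.range t.length).foldl
      (fun (st : Int × Int) k =>
        if (h :: t).getD (k + 1) 0 = (h :: t).getD k 0 + 1 then
          (if st.2 + 1 ≥ 5 then st.1 + 2 else st.1, st.2 + 1)
        else (st.1, 1)) (p, cc)).1
    = p + pvStraight h cc t := by
  induction t generalizing h p cc with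
  | nil => simp [pvStraight]
  | cons r rest ih =>
    simp only [List.length_cons]
    rw [List.range_succ_eq_map, List.foldl_cons, List.foldl_map]
    simp only [Nat.succ_eq_add_one, List.getD_cons_succ, List.getD_cons_zero, pvStraight]
    simp only [List.getD_cons_succ] at ih
    by_cases hr : r = h + 1
    · rw [if_pos hr, if_pos hr]
      subst hr
      by_cases h5 : cc + 1 ≥ 5
      · rw [if_pos h5, ih, if_pos h5]; ring
      · rw [if_neg h5, ih, if_neg h5]; ring
    · rw [if_neg hr, if_neg hr, ih]

lemma pvScore_eq (c : Int) :
    ((if c ≥ 2 then (1:Int) else 0) + (if c ≥ 3 then 1 else 0) + 2 * (if c ≥ 4 then 1 else 0))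
      = pvScore c := by
  simp only [pvScore]; split_ifs <;> ring1

/-- A's Int index loop over range(1, len u) equals the structural straight scan. -/
lemma pvA_straight (h : Int) (t : List Int) (p cc : Int) :
    ((PySem.List.pyRange 1 ((h :: t).length : Int) 1).foldl
      (fun (st : Int × Int) i =>
        if PySem.List.pyGetD (h :: t) i 0 = PySem.List.pyGetD (h :: t) (i - 1) 0 + 1 then
          (if st.2 + 1 ≥ 5 then st.1 + 2 else st.1, st.2 + 1)
        else (st.1, 1)) (p, cc)).1
    = p + pvStraight h cc t := by
  have hlen : (((h :: t).length : Int) - 1).toNat = t.length := by simp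
  rw [PySem.List.pyRange_one, hlen, List.foldl_map]
  have hbody : (fun (st : Int × Int) (k : Nat) =>
      if PySem.List.pyGetD (h :: t) (1 + (k : Int)) 0 = PySem.List.pyGetD (h :: t) (1 + (k : Int) - 1) 0 + 1 then
        (if st.2 + 1 ≥ 5 then st.1 + 2 else st.1, st.2 + 1)
      else (st.1, 1))
      = (fun (st : Int × Int) (k : Nat) =>
      if (h :: t).getD (k + 1) 0 = (h :: t).getD k 0 + 1 then
        (if st.2 + 1 ≥ 5 then st.1 + 2 else st.1, st.2 + 1)
      else (st.1, 1)) := by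
    funext st k
    have h2 : (1 + (k : Int) - 1) = ((k : Nat) : Int) := by ring
    rw [h2]
    have h1 : (1 + (k : Int)) = ((k + 1 : Nat) : Int) := by push_cast; ring
    rw [h1, PySem.List.pyGetD_natCast, PySem.List.pyGetD_natCast]
  rw [hbody, pvA_straight_nat]

/-- The window predicate B tests: the four predecessor ranks are all present. -/
def pvWin (S : List Int) (r : Int) : Bool :=
  decide (r - 1 ∈ S ∧ r - 2 ∈ S ∧ r - 3 ∈ S ∧ r - 4 ∈ S)

/-- Core: the run scan over a strictly increasing tail equals counting 5-windows by membership. -/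
lemma pvStraight_countP (S : List Int) (t : List Int) : ∀ (p cc : Int),
    (p :: t).Pairwise (· < ·) →
    (∀ x ∈ S, x ≤ p ∨ x ∈ t) →
    (∀ x ∈ t, x ∈ S) →
    p ∈ S →
    1 ≤ cc →
    (∀ j : Int, 1 ≤ j → j ≤ 4 → j ≤ cc - 1 → p - j ∈ S) →
    (cc ≤ 4 → p - cc ∉ S) →
    pvStraight p cc t = 2 * (t.countP (pvWin S) : Int) := by
  induction t with
  | nil => intro p cc _ _ _ _ _ _ _; simp [pvStraight]
  | cons r rest ih =>
    intro p cc hpw hS ht hp hcc hA hB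
    have hpr : p < r := (List.pairwise_cons.1 hpw).1 r (List.mem_cons_self)
    have hrw : (r :: rest).Pairwise (· < ·) := (List.pairwise_cons.1 hpw).2
    have hrrest : ∀ x ∈ rest, r < x := fun x hx => (List.pairwise_cons.1 hrw).1 x hx
    have hS' : ∀ x ∈ S, x ≤ r ∨ x ∈ rest := by
      intro x hx
      rcases hS x hx with hle | hm
      · exact Or.inl (le_of_lt (lt_of_le_of_lt hle hpr))
      · rcases List.mem_cons.1 hm with h1 | h1
        · exact Or.inl (le_of_eq h1)
        · exact Or.inr h1
    have ht' : ∀ x ∈ rest, x ∈ S := fun x hx => ht x (List.mem_cons_of_mem _ hx)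
    have hrS : r ∈ S := ht r List.mem_cons_self
    rw [List.countP_cons]
    simp only [pvStraight]
    by_cases hr : r = p + 1
    · -- run extends; window holds iff cc + 1 ≥ 5
      rw [if_pos hr]
      have hwin : pvWin S r = (decide (cc + 1 ≥ 5)) := by
        by_cases h5 : cc + 1 ≥ 5
        · have w1 : r - 1 ∈ S := by rw [show r - 1 = p from by omega]; exact hp
          have w2 : r - 2 ∈ S := by
            rw [show r - 2 = p - 1 from by omega]
            exact hA 1 (by norm_num) (by norm_num) (by omega)
          have w3 : r - 3 ∈ S := by
            rw [show r - 3 = p - 2 from by omega]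
            exact hA 2 (by norm_num) (by norm_num) (by omega)
          have w4 : r - 4 ∈ S := by
            rw [show r - 4 = p - 3 from by omega]
            exact hA 3 (by norm_num) (by norm_num) (by omega)
          simp [pvWin, h5, w1, w2, w3, w4]
        · have hnb : p - cc ∉ S := hB (by omega)
          have hfalse : ¬ (r - 1 ∈ S ∧ r - 2 ∈ S ∧ r - 3 ∈ S ∧ r - 4 ∈ S) := by
            rintro ⟨w1, w2, w3, w4⟩
            rcases (by omega : cc = 1 ∨ cc = 2 ∨ cc = 3) with h | h | h <;> subst h
            · exact hnb (by rw [show p - 1 = r - 2 from by omega]; exact w2)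
            · exact hnb (by rw [show p - 2 = r - 3 from by omega]; exact w3)
            · exact hnb (by rw [show p - 3 = r - 4 from by omega]; exact w4)
          simp [pvWin, h5, hfalse]
      rw [ih r (cc + 1) hrw hS' ht' hrS (by omega)
        (by
          intro j hj1 hj4 hjc
          by_cases hj : j = 1
          · subst hj; subst hr; simpa using hp
          · have := hA (j - 1) (by omega) (by omega) (by omega)
            subst hr
            have heq : p + 1 - j = p - (j - 1) := by ring
            rw [heq]; exact this)
        (by
          intro hc4
          subst hr
          have heq : p + 1 - (cc + 1) = p - cc := by ring
          rw [heq]; exact hB (by omega))]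
      by_cases h5 : cc + 1 ≥ 5
      · rw [if_pos h5]
        rw [hwin]; simp [h5]; ring
      · rw [if_neg h5]
        rw [hwin]; simp [h5]
    · -- run breaks; window fails since r - 1 ∉ S
      rw [if_neg hr]
      have hr1 : r - 1 ∉ S := by
        intro hmem
        rcases hS r hrS with hle | hm
        · omega
        rcases hS (r - 1) hmem with hle | hm1
        · omega
        rcases List.mem_cons.1 hm1 with h1 | h1
        · omega
        · have := hrrest _ h1; omega
      have hwin : pvWin S r = false := by
        simp [pvWin]; intro w1; exact absurd w1 hr1
      rw [ih r 1 hrw hS' ht' hrS (by norm_num)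
        (by intro j hj1 _ hjc; omega)
        (by intro _; simpa using hr1)]
      rw [hwin]; simp

-- ===== VERDICT (by name: the statement is the Claim_ definition above) =====
theorem count_combination_potential_py_spec : Claim_equal_count_combination_potential_py := by
  intro hand _
  unfold Spec_count_combination_potential_py
  unfold count_combination_potential_py count_combination_potential_py_alt
  by_cases hnil : hand = []
  · subst hnil; rfl
  · rw [if_neg hnil]
    set ranks := hand.map (fun card => PySem.Int.floordiv card 4) with hranks
    have hdict : hand.foldl (fun d card =>
        let rank := PySem.Int.floordiv card 4
        d.insert rank (d.getD rank 0 + 1)) PySem.Dict.empty = PySem.Dict.counter ranks := by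
      rw [hranks, ← PySem.Dict.foldl_insert_getD_add_one_eq_counter, List.foldl_map]
    simp only [hdict]
    simp only [PySem.Dict.values, PySem.Dict.items_counter, PySem.Dict.keys_counter,
      List.map_map]
    rw [pvA_pair_fold]
    set S := PySem.Set.ofList ranks with hSdef
    have hSnodup : S.Nodup := PySem.Set.nodup_ofList ..
    have hu : PySem.List.sorted S (fun x => x) false ≠ [] := by
      intro hnil2
      rw [PySem.List.sorted_eq_nil_iff] at hnil2
      cases hand with
      | nil => exact hnil rfl
      | cons a l =>
        have hmem : PySem.Int.floordiv a 4 ∈ S := by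
          rw [hSdef, PySem.Set.mem_ofList, hranks]; simp
        rw [hnil2] at hmem
        simp at hmem
    obtain ⟨h0, t, hsort⟩ : ∃ h0 t,
        PySem.List.sorted S (fun x => x) false = h0 :: t := by
      cases hL : PySem.List.sorted S (fun x => x) false with
      | nil => exact absurd hL hu
      | cons a b => exact ⟨a, b, rfl⟩
    rw [hsort, pvA_straight]
    have hperm : (h0 :: t).Perm S := by
      rw [← hsort]; exact PySem.List.sorted_perm ..
    have hpw : (h0 :: t).Pairwise (· < ·) := by
      rw [← hsort, hSdef]
      exact PySem.List.sorted_ofList_pairwise_lt ..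
    have hmemS : ∀ x, x ∈ S ↔ x ∈ h0 :: t := fun x => (hperm.mem_iff).symm
    -- B's window sum is a countP over set(S), a permutation of S
    have hpermO : (PySem.Set.ofList S).Perm S :=
      (List.perm_ext_iff_of_nodup (PySem.Set.nodup_ofList ..) hSnodup).2
        (fun x => PySem.Set.mem_ofList ..)
    have hBsum : ((PySem.Set.ofList S).map (fun r =>
        if r - 1 ∈ PySem.Set.ofList S ∧ r - 2 ∈ PySem.Set.ofList S ∧
           r - 3 ∈ PySem.Set.ofList S ∧ r - 4 ∈ PySem.Set.ofList S then (1:Int) else 0)).sum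
        = ((PySem.Set.ofList S).countP (pvWin S) : Int) := by
      have hfun : (fun r : Int => if r - 1 ∈ PySem.Set.ofList S ∧ r - 2 ∈ PySem.Set.ofList S ∧
          r - 3 ∈ PySem.Set.ofList S ∧ r - 4 ∈ PySem.Set.ofList S then (1:Int) else 0)
          = fun r => if pvWin S r = true then 1 else 0 := by
        funext r
        simp [pvWin, PySem.Set.mem_ofList, hSdef]
      rw [hfun, PySem.List.sum_map_ite_one_zero]
    -- A's straight scan equals the window count over t
    have hstraight : pvStraight h0 1 t = 2 * (t.countP (pvWin S) : Int) := by
      apply pvStraight_countP S t h0 1 hpw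
      · intro x hx
        rcases List.mem_cons.1 ((hmemS x).1 hx) with h1 | h1
        · exact Or.inl (le_of_eq h1)
        · exact Or.inr h1
      · intro x hx; exact (hmemS x).2 (List.mem_cons_of_mem _ hx)
      · exact (hmemS h0).2 List.mem_cons_self
      · norm_num
      · intro j hj1 _ hjc; omega
      · intro _ hmem
        rcases List.mem_cons.1 ((hmemS _).1 hmem) with h1 | h1
        · omega
        · have := (List.pairwise_cons.1 hpw).1 _ h1; omega
    have hhead : pvWin S h0 = false := by
      simp only [pvWin, decide_eq_false_iff_not]
      rintro ⟨w1, _, _, _⟩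
      rcases List.mem_cons.1 ((hmemS _).1 w1) with h1 | h1
      · omega
      · have := (List.pairwise_cons.1 hpw).1 _ h1; omega
    have hcount : ((PySem.Set.ofList S).countP (pvWin S) : Int) = (t.countP (pvWin S) : Int) := by
      rw [hpermO.countP_eq (pvWin S), ← hperm.countP_eq (pvWin S), List.countP_cons, hhead]
      simp
    rw [hBsum, hcount, hstraight]
    simp only [pvScore_eq, List.map_map, Function.comp_def]
    ring
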